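-- pv_equiv track=rewrite | github.com/junkwama/EJCSKEU26 | alembic/versions/0004_seed.py | _iter_sql_statements
-- ===== SOURCE A (Python) =====
-- def _iter_sql_statements(sql_text: str) -> list[str]:
--     # Remove full-line comments and join; then split on ';'
--     lines: list[str] = []
--     for raw in sql_text.splitlines():
--         stripped = raw.strip()
--         if not stripped:
--             continue
--         if stripped.startswith("--"):
--             continue
--         lines.append(raw)
--
--     joined = "\n".join(lines)
--     statements = [s.strip() for s in joined.split(";")]
--     return [s for s in statements if s]
-- ===== SOURCE B (Python) =====
-- def _iter_sql_statements(sql_text: str) -> list[str]: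
--     # Single streaming pass: statements are emitted as semicolon boundaries are met,
--     # with a running buffer joining kept lines, instead of build-all-then-split.
--     out: list[str] = []
--     buf = ""
--     seen = False
--     for raw in sql_text.splitlines():
--         stripped = raw.strip()
--         if not stripped or stripped.startswith("--"):
--             continue
--         pieces = raw.split(";")
--         buf += ("\n" if seen else "") + pieces[0]
--         for p in pieces[1:]:
--             out.append(buf)
--             buf = p
--         seen = True
--     out.append(buf)
--     return [t for t in (s.strip() for s in out) if t]
-- ===== Notes on version B (the rewrite author's own statement) =====
-- stated objective: alternative
-- what changed: Replaces A's build-all-then-split pipeline (collect kept lines, join with newline, split the whole text on the semicolon separator) by a single streaming pass that emits each statement as its terminating semicolon is reached, keeping only a running buffer across kept lines.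
import Mathlib
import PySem

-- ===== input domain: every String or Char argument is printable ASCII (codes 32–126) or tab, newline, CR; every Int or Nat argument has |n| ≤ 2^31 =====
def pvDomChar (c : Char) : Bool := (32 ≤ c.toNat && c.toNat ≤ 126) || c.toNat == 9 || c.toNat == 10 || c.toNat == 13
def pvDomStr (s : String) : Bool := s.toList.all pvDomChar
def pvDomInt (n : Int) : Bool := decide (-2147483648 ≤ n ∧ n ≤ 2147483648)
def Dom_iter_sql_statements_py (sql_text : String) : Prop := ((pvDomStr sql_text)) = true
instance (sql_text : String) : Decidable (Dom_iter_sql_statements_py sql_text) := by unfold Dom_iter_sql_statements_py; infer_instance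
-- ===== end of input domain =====

-- B replaces A's build-all-then-split pipeline by a single streaming pass that emits each
-- statement as its terminating semicolon is reached (objective: alternative decomposition, same cost).

-- ===== PORT A =====
-- Port of A at the PySem.Chars (List Char) level; PySem.Str.* are thin wrappers over these,
-- so this is the same computation, exactly (String.ofList rebuilds the result strings).
def iter_sql_statements_py (sql_text : String) : List String :=
  -- lines = []; for raw in sql_text.splitlines(): skip blank / '--' lines; lines.append(raw)
  let lines := (PySem.Chars.splitlines sql_text.toList).foldl (fun acc raw =>
      let stripped := PySem.Chars.strip raw
      if stripped.isEmpty then acc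
      else if PySem.Chars.startswith stripped ['-', '-'] then acc
      else acc ++ [raw]) []
  -- joined = "\n".join(lines)
  let joined := PySem.Chars.join ['\n'] lines
  -- statements = [s.strip() for s in joined.split(";")]
  let statements := (PySem.Chars.splitOn joined [';']).map PySem.Chars.strip
  -- return [s for s in statements if s]
  (statements.filter (fun s => !s.isEmpty)).map String.ofList

-- ===== PORT B =====
-- Port of Source B at the same PySem.Chars level: one streaming fold over the lines with state
-- (out, buf, seen); the inner 'for p in pieces[1:]' loop is the inner foldl.
def iter_sql_statements_py_alt (sql_text : String) : List String :=
  let step := fun (st : List (List Char) × List Char × Bool) (raw : List Char) =>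
      let stripped := PySem.Chars.strip raw
      if stripped.isEmpty || PySem.Chars.startswith stripped ['-', '-'] then st
      else
        let out := st.1
        let buf := st.2.1
        let seen := st.2.2
        let pieces := PySem.Chars.splitOn raw [';']
        -- buf += ("\n" if seen else "") + pieces[0]
        let buf := buf ++ (if seen then ['\n'] else []) ++ pieces.headD []
        -- for p in pieces[1:]: out.append(buf); buf = p
        let ob := (pieces.drop 1).foldl
          (fun (ob : List (List Char) × List Char) p => (ob.1 ++ [ob.2], p)) (out, buf)
        (ob.1, ob.2, true)
  let fin := (PySem.Chars.splitlines sql_text.toList).foldl step ([], [], false)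
  -- out.append(buf); return [t for t in (s.strip() for s in out) if t]
  (((fin.1 ++ [fin.2.1]).map PySem.Chars.strip).filter (fun s => !s.isEmpty)).map String.ofList

-- ===== PRECONDITION & SPEC =====
def Spec_iter_sql_statements_py (sql_text : String) (out : List String) : Prop := out = iter_sql_statements_py_alt sql_text
instance (sql_text : String) (out : List String) : Decidable (Spec_iter_sql_statements_py sql_text out) := by unfold Spec_iter_sql_statements_py; infer_instance

-- ===== CLAIM (what is proved, stated in full; the proofs are below) =====
def Claim_equal_iter_sql_statements_py : Prop := ∀ (sql_text : String), Dom_iter_sql_statements_py sql_text → Spec_iter_sql_statements_py sql_text (iter_sql_statements_py sql_text)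

-- ===== LEMMAS AND PROOFS =====

-- Structural (fuel-free) characterisation of splitting on a single character.
def pvSplit (c : Char) : List Char → List (List Char)
  | [] => [[]]
  | x :: xs => if x = c then [] :: pvSplit c xs else (pvSplit c xs).modifyHead (x :: ·)

theorem pvSplit_ne_nil (c : Char) (l : List Char) : pvSplit c l ≠ [] := by
  induction l with
  | nil => simp [pvSplit]
  | cons y ys ih =>
    simp only [pvSplit]
    split
    · simp
    · cases h : pvSplit c ys with
      | nil => exact absurd h ih
      | cons a t => simp [List.modifyHead]

theorem splitOn_go_spec (c : Char) (fuel : Nat) (l cur : List Char)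
    (acc : List (List Char)) (h : l.length ≤ fuel) :
    PySem.Chars.splitOn.go [c] fuel l cur acc
      = acc.reverse ++ (pvSplit c l).modifyHead (cur.reverse ++ ·) := by
  induction fuel generalizing l cur acc with
  | zero =>
    interval_cases hl : l.length
    · have : l = [] := List.length_eq_zero_iff.mp hl
      subst this
      simp [PySem.Chars.splitOn.go, pvSplit, List.modifyHead]
  | succ n ih =>
    cases l with
    | nil => simp [PySem.Chars.splitOn.go, pvSplit, List.modifyHead]
    | cons x xs =>
      simp only [PySem.Chars.splitOn.go]
      by_cases hx : x = c
      · subst hx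
        rw [if_pos (by simp [List.isPrefixOf])]
        have hd : List.drop [x].length (x :: xs) = xs := rfl
        rw [hd, ih xs [] (cur.reverse :: acc) (by simpa using Nat.le_of_succ_le_succ h)]
        simp only [pvSplit, List.modifyHead, List.reverse_cons, List.append_assoc,
          List.append_cancel_left_eq]
        cases pvSplit x xs <;> simp [List.modifyHead]
      · rw [if_neg (by simp [List.isPrefixOf, Ne.symm hx])]
        rw [ih xs (x :: cur) acc (by simpa using Nat.le_of_succ_le_succ h)]
        simp only [pvSplit, if_neg hx]
        cases hs : pvSplit c xs with
        | nil => exact absurd hs (pvSplit_ne_nil c xs)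
        | cons a t => simp [List.modifyHead]

theorem splitOn_eq_pvSplit (c : Char) (l : List Char) :
    PySem.Chars.splitOn l [c] = pvSplit c l := by
  have h := splitOn_go_spec c (l.length + 1) l [] [] (by omega)
  simp only [List.reverse_nil, List.nil_append] at h
  rw [PySem.Chars.splitOn, h]
  cases pvSplit c l <;> simp

theorem pvSplit_append (c : Char) (a b : List Char) :
    pvSplit c (a ++ b)
      = (pvSplit c a).dropLast
          ++ (pvSplit c b).modifyHead ((pvSplit c a).getLastD [] ++ ·) := by
  induction a with
  | nil =>
    cases h : pvSplit c b with
    | nil => exact absurd h (pvSplit_ne_nil c b)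
    | cons x t => simp [pvSplit, List.modifyHead, h]
  | cons x xs ih =>
    simp only [List.cons_append, pvSplit]
    by_cases hx : x = c
    · rw [if_pos hx, if_pos hx, ih]
      cases hs : pvSplit c xs with
      | nil => exact absurd hs (pvSplit_ne_nil c xs)
      | cons s0 st => simp [List.modifyHead]
    · rw [if_neg hx, if_neg hx, ih]
      cases hs : pvSplit c xs with
      | nil => exact absurd hs (pvSplit_ne_nil c xs)
      | cons s0 st =>
        cases st with
        | nil =>
          cases hb : pvSplit c b with
          | nil => exact absurd hb (pvSplit_ne_nil c b)
          | cons b0 bt => simp [List.modifyHead]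
        | cons s1 st' =>
          simp [List.modifyHead]

-- The skip condition both programs test on each line.
def pvSkip (raw : List Char) : Bool :=
  (PySem.Chars.strip raw).isEmpty
    || PySem.Chars.startswith (PySem.Chars.strip raw) ['-', '-']

-- The characters that follow the current buffer in the '\n'-join of the remaining kept lines.
def pvJT (ks : List (List Char)) : List Char := (ks.map (fun l => '\n' :: l)).flatten

def pvLastD (L : List (List Char)) : List Char := L.getLastD []

-- The unguarded body of B's per-line step, with pvSplit in place of Chars.splitOn.
def pvBody (st : List (List Char) × List Char × Bool) (raw : List Char) :
    List (List Char) × List Char × Bool :=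
  let P := pvSplit ';' raw
  let buf := st.2.1 ++ (if st.2.2 then ['\n'] else []) ++ P.headD []
  let ob := (P.drop 1).foldl (fun (ob : List (List Char) × List Char) p => (ob.1 ++ [ob.2], p))
    (st.1, buf)
  (ob.1, ob.2, true)

theorem pv_foldl_skip {α β : Type} (C : β → Bool) (f : α → β → α) (ls : List β) (st : α) :
    ls.foldl (fun st x => if C x then st else f st x) st
      = (ls.filter (fun x => !C x)).foldl f st := by
  induction ls generalizing st with
  | nil => rfl
  | cons x xs ih =>
    by_cases h : C x <;> simp [List.foldl_cons, h, ih]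

theorem pv_stepA_eq :
    (fun (acc : List (List Char)) (raw : List Char) =>
      let stripped := PySem.Chars.strip raw
      if stripped.isEmpty then acc
      else if PySem.Chars.startswith stripped ['-', '-'] then acc
      else acc ++ [raw])
    = fun acc raw => if pvSkip raw then acc else acc ++ [raw] := by
  funext acc raw
  by_cases h1 : (PySem.Chars.strip raw).isEmpty <;>
    by_cases h2 : PySem.Chars.startswith (PySem.Chars.strip raw) ['-', '-'] <;>
    simp [pvSkip, h1, h2]

theorem pv_stepB_eq :
    (fun (st : List (List Char) × List Char × Bool) (raw : List Char) =>
      let stripped := PySem.Chars.strip raw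
      if stripped.isEmpty || PySem.Chars.startswith stripped ['-', '-'] then st
      else
        let out := st.1
        let buf := st.2.1
        let seen := st.2.2
        let pieces := PySem.Chars.splitOn raw [';']
        let buf := buf ++ (if seen then ['\n'] else []) ++ pieces.headD []
        let ob := (pieces.drop 1).foldl
          (fun (ob : List (List Char) × List Char) p => (ob.1 ++ [ob.2], p)) (out, buf)
        (ob.1, ob.2, true))
    = fun st raw => if pvSkip raw then st else pvBody st raw := by
  funext st raw
  simp only [pvSkip, pvBody, splitOn_eq_pvSplit]

theorem pv_inner (ps : List (List Char)) (out : List (List Char)) (buf : List Char) :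
    ps.foldl (fun (ob : List (List Char) × List Char) p => (ob.1 ++ [ob.2], p)) (out, buf)
      = (out ++ (buf :: ps).dropLast, pvLastD (buf :: ps)) := by
  induction ps generalizing out buf with
  | nil => simp [pvLastD]
  | cons p pt ih =>
    rw [List.foldl_cons, ih]
    simp [pvLastD]

theorem pv_getLastD_ne {α : Type} (L : List α) (h : L ≠ []) (d d' : α) :
    L.getLastD d = L.getLastD d' := by
  rw [List.getLastD_eq_getLast?, List.getLastD_eq_getLast?, List.getLast?_eq_some_getLast h,
    Option.getD_some, Option.getD_some]

theorem pv_getLastD_append (X L : List (List Char)) (h : L ≠ []) :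
    pvLastD (X ++ L) = pvLastD L := by
  rw [pvLastD, pvLastD, List.getLastD_eq_getLast?, List.getLastD_eq_getLast?,
    List.getLast?_append_of_ne_nil X h]

theorem pv_modifyHead_ne_nil {α : Type} (f : α → α) (L : List α) (h : L ≠ []) :
    L.modifyHead f ≠ [] := by
  cases L with
  | nil => exact absurd rfl h
  | cons a t => simp [List.modifyHead]

theorem pv_dropLast_lastD (L : List (List Char)) (h : L ≠ []) :
    L.dropLast ++ [pvLastD L] = L := by
  rw [pvLastD, List.getLastD_eq_getLast?, List.getLast?_eq_some_getLast h, Option.getD_some,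
    List.dropLast_concat_getLast h]

theorem pv_join_cons (l : List Char) (ks : List (List Char)) :
    PySem.Chars.join ['\n'] (l :: ks) = l ++ pvJT ks := by
  induction ks generalizing l with
  | nil => simp [PySem.Chars.join_singleton, pvJT]
  | cons k kt ih => rw [PySem.Chars.join_cons_cons, ih]; simp [pvJT]

theorem pv_stream (ks : List (List Char)) (out : List (List Char)) (buf : List Char) :
    ks.foldl pvBody (out, buf, true)
      = (out ++ ((pvSplit ';' (pvJT ks)).modifyHead (buf ++ ·)).dropLast,
         pvLastD ((pvSplit ';' (pvJT ks)).modifyHead (buf ++ ·)), true) := by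
  induction ks generalizing out buf with
  | nil => simp [pvJT, pvSplit, pvLastD, List.modifyHead]
  | cons l kt ih =>
    obtain ⟨p0, pt, hP⟩ : ∃ p0 pt, pvSplit ';' l = p0 :: pt := by
      cases h : pvSplit ';' l with
      | nil => exact absurd h (pvSplit_ne_nil _ _)
      | cons a t => exact ⟨a, t, rfl⟩
    rw [List.foldl_cons,
      show pvBody (out, buf, true) l
          = (out ++ ((buf ++ '\n' :: p0) :: pt).dropLast, pvLastD ((buf ++ '\n' :: p0) :: pt),
             true) from by
        simp only [pvBody, hP]
        rw [pv_inner]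
        simp,
      ih]
    have hJT : pvJT (l :: kt) = '\n' :: (l ++ pvJT kt) := by simp [pvJT]
    have hsplit : pvSplit ';' ('\n' :: (l ++ pvJT kt))
        = (pvSplit ';' (l ++ pvJT kt)).modifyHead ('\n' :: ·) := by
      simp [pvSplit]
    rw [hJT, hsplit, pvSplit_append, hP]
    have hT := pvSplit_ne_nil ';' (pvJT kt)
    set T := pvSplit ';' (pvJT kt) with hTdef
    have hM'ne : T.modifyHead (fun x => pvLastD ((buf ++ '\n' :: p0) :: pt) ++ x) ≠ [] :=
      pv_modifyHead_ne_nil _ T hT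
    have hKey : List.modifyHead (fun x => buf ++ x) (List.modifyHead (fun x => '\n' :: x)
        ((p0 :: pt).dropLast ++ T.modifyHead (fun x => (p0 :: pt).getLastD [] ++ x)))
        = ((buf ++ '\n' :: p0) :: pt).dropLast
            ++ T.modifyHead (fun x => pvLastD ((buf ++ '\n' :: p0) :: pt) ++ x) := by
      cases pt with
      | nil =>
        cases hT' : T with
        | nil => exact absurd hT' hT
        | cons t0 tt => simp [List.modifyHead, pvLastD]
      | cons q qt =>
        have h1 : (p0 :: q :: qt).getLastD [] = (q :: qt).getLastD (buf ++ '\n' :: p0) := by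
          rw [List.getLastD_cons]
          exact pv_getLastD_ne (q :: qt) (by simp) _ _
        cases hT' : T with
        | nil => exact absurd hT' hT
        | cons t0 tt =>
          simp [List.modifyHead, pvLastD,
            List.dropLast_cons_of_ne_nil (List.cons_ne_nil q qt), List.cons_append]
    rw [hKey]
    simp [hM'ne, pv_getLastD_append _ _ hM'ne, List.append_assoc]

theorem pv_first (l : List Char) :
    pvBody ([], [], false) l = ((pvSplit ';' l).dropLast, pvLastD (pvSplit ';' l), true) := by
  obtain ⟨p0, pt, hP⟩ : ∃ p0 pt, pvSplit ';' l = p0 :: pt := by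
    cases h : pvSplit ';' l with
    | nil => exact absurd h (pvSplit_ne_nil _ _)
    | cons a t => exact ⟨a, t, rfl⟩
  simp only [pvBody, hP]
  rw [pv_inner]
  simp

-- ===== VERDICT (by name: the statement is the Claim_ definition above) =====
theorem iter_sql_statements_py_spec : Claim_equal_iter_sql_statements_py := by
  unfold Claim_equal_iter_sql_statements_py
  intro s _
  unfold Spec_iter_sql_statements_py iter_sql_statements_py iter_sql_statements_py_alt
  simp only [pv_stepA_eq, pv_stepB_eq, pv_foldl_skip, PySem.List.foldl_append_singleton,
    List.nil_append]
  cases hk : (PySem.Chars.splitlines s.toList).filter (fun x => !pvSkip x) with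
  | nil => decide
  | cons l kt =>
    rw [List.foldl_cons, pv_first, pv_stream, pv_join_cons, splitOn_eq_pvSplit,
      pvSplit_append]
    have hP := pvSplit_ne_nil ';' l
    have hT := pvSplit_ne_nil ';' (pvJT kt)
    have hMne : (pvSplit ';' (pvJT kt)).modifyHead
        (fun x => pvLastD (pvSplit ';' l) ++ x) ≠ [] := pv_modifyHead_ne_nil _ _ hT
    rw [List.append_assoc, pv_dropLast_lastD _ hMne]
    simp [pvLastD]
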